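-- pv_equiv track=rewrite | github.com/ecly/kattis | thisaintyourgrandpascheckerboard/thisaintyourgrandpascheckerboard.py | verify_line
-- ===== SOURCE A (Python) =====
-- def verify_line(line):
--     whites = line.count("W")
--     blacks = line.count("B")
--     if whites != blacks:
--         return False
--
--     if len(line) < 3:
--         return True
--
--     for x, y, z in zip(line, line[1:], line[2:]):
--         if x == y and y == z:
--             return False
--
--     return True
-- ===== SOURCE B (Python) =====
-- def verify_line(line):
--     w = b = 0
--     prev = None
--     run = 0
--     for c in line:
--         if c == "W":
--             w += 1
--         elif c == "B":
--             b += 1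
--         if c == prev:
--             run += 1
--             if run == 3:
--                 return False
--         else:
--             prev = c
--             run = 1
--     return w == b
-- ===== Notes on version B (the rewrite author's own statement) =====
-- stated objective: alternative
-- what changed: Replaced A's three separate passes (two str.count calls plus a windowed zip scan) by one single pass maintaining W/B tallies and a run-length counter with early exit on a run of three.
import Mathlib
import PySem

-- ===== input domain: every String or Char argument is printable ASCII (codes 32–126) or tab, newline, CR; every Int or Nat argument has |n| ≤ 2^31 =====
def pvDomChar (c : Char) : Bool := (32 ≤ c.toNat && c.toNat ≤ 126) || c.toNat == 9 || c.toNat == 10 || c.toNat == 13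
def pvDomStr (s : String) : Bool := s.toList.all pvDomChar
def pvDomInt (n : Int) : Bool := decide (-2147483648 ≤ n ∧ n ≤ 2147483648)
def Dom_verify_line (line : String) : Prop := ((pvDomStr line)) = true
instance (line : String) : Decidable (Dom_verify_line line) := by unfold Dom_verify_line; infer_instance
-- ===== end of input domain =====

-- B replaces A's three passes (two .count calls + a windowed triple zip) by one pass with
-- W/B tallies and a run-length counter with early exit; alternative decomposition, same cost.

-- ===== PORT A =====
def verify_line (line : String) : Bool :=
  let whites := PySem.Str.count line "W"
  let blacks := PySem.Str.count line "B"
  if whites ≠ blacks then false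
  else if PySem.Str.len line < 3 then true
  else
    let l := line.toList
    -- for x, y, z in zip(line, line[1:], line[2:]): if x == y and y == z: return False
    (l.zip ((PySem.List.slice l (some 1) none).zip (PySem.List.slice l (some 2) none))).all
      (fun t => !(t.1 == t.2.1 && t.2.1 == t.2.2))

-- ===== PORT B =====
-- the single for-loop of Source B: state (w, b, prev, run), early `return False` at run == 3
def pvBLoop : List Char → Int → Int → Option Char → Nat → Bool
  | [], w, b, _, _ => w == b
  | c :: rest, w, b, prev, run =>
    let w' := if c == 'W' then w + 1 else w
    let b' := if c != 'W' && c == 'B' then b + 1 else b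
    if some c == prev then
      if run + 1 == 3 then false
      else pvBLoop rest w' b' prev (run + 1)
    else pvBLoop rest w' b' (some c) 1

def verify_line_alt (line : String) : Bool :=
  pvBLoop line.toList 0 0 none 0

-- ===== PRECONDITION & SPEC =====
def Spec_verify_line (line : String) (out : Bool) : Prop := out = verify_line_alt line
instance (line : String) (out : Bool) : Decidable (Spec_verify_line line out) := by unfold Spec_verify_line; infer_instance

-- ===== CLAIM (what is proved, stated in full; the proofs are below) =====
def Claim_equal_verify_line : Prop := ∀ (line : String), Dom_verify_line line → Spec_verify_line line (verify_line line)

-- ===== LEMMAS AND PROOFS =====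

-- "no three equal consecutive characters" as a structural predicate
def pvNoTri : List Char → Bool
  | x :: y :: z :: r => !(x == y && y == z) && pvNoTri (y :: z :: r)
  | _ => true

-- counting a single character with Python str.count
theorem pvCountGo_singleton (c : Char) :
    ∀ (fuel : Nat) (l : List Char) (acc : Nat), l.length ≤ fuel →
      PySem.Chars.count.go [c] fuel l acc = acc + l.count c := by
  intro fuel
  induction fuel with
  | zero =>
    intro l acc h
    cases l with
    | nil => simp [PySem.Chars.count.go]
    | cons x t => simp at h
  | succ n ih =>
    intro l acc h
    cases l with
    | nil => simp [PySem.Chars.count.go]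
    | cons x t =>
      have ht : t.length ≤ n := by simpa using Nat.le_of_succ_le_succ h
      by_cases hx : c = x
      · subst hx
        simp [PySem.Chars.count.go, List.isPrefixOf, ih t (acc + 1) ht]
        omega
      · simp [PySem.Chars.count.go, List.isPrefixOf, hx, Ne.symm hx, ih t acc ht]

theorem pvCount_singleton (l : List Char) (c : Char) :
    PySem.Chars.count l [c] = l.count c := by
  have h := pvCountGo_singleton c l.length l 0 (le_refl _)
  simpa [PySem.Chars.count] using h

-- the zip-of-three-slices scan equals pvNoTri
theorem pvZipAll (l : List Char) :
    (l.zip ((l.drop 1).zip (l.drop 2))).all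
      (fun t => !(t.1 == t.2.1 && t.2.1 == t.2.2)) = pvNoTri l := by
  match l with
  | [] => rfl
  | [x] => rfl
  | [x, y] => rfl
  | x :: y :: z :: r =>
    have ih := pvZipAll (y :: z :: r)
    simp only [List.drop_succ_cons, List.drop_zero, List.zip_cons_cons,
      List.all_cons, pvNoTri] at *
    rw [← ih]
termination_by l.length

-- short lists trivially satisfy pvNoTri
theorem pvNoTri_short (l : List Char) (h : l.length < 3) : pvNoTri l = true := by
  match l, h with
  | [], _ => rfl
  | [x], _ => rfl
  | [x, y], _ => rfl

-- dropping a first character different from the next leaves pvNoTri unchanged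
theorem pvNoTri_cons_ne (p c : Char) (r : List Char) (h : p ≠ c) :
    pvNoTri (p :: c :: r) = pvNoTri (c :: r) := by
  cases r with
  | nil => rfl
  | cons z r' => simp [pvNoTri, h]

-- the run-length part of B's loop, isolated from the tallies
def pvNoT : Option Char → Nat → List Char → Bool
  | _, _, [] => true
  | prev, run, c :: r =>
    if some c == prev then (run + 1 != 3) && pvNoT prev (run + 1) r
    else pvNoT (some c) 1 r

theorem pvNoT_one_two (l : List Char) : ∀ (p : Char),
    pvNoT (some p) 1 l = pvNoTri (p :: l) ∧
    pvNoT (some p) 2 l = pvNoTri (p :: p :: l) := by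
  induction l with
  | nil => intro p; exact ⟨rfl, rfl⟩
  | cons c r ih =>
    intro p
    by_cases hc : c = p
    · subst hc
      refine ⟨?_, ?_⟩
      · show pvNoT (some c) 1 (c :: r) = _
        simp only [pvNoT, beq_self_eq_true, if_true]
        rw [show ((1 : Nat) + 1 != 3) = true from rfl, Bool.true_and, (ih c).2]
      · show pvNoT (some c) 2 (c :: r) = _
        simp only [pvNoT, beq_self_eq_true, if_true]
        rw [show ((2 : Nat) + 1 != 3) = false from rfl, Bool.false_and]
        simp [pvNoTri]
    · have hne : (some c == some p) = false := by simp [hc]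
      refine ⟨?_, ?_⟩
      · show pvNoT (some p) 1 (c :: r) = _
        simp only [pvNoT, hne, Bool.false_eq_true, if_false]
        rw [(ih c).1, pvNoTri_cons_ne p c r (Ne.symm hc)]
      · show pvNoT (some p) 2 (c :: r) = _
        simp only [pvNoT, hne, Bool.false_eq_true, if_false]
        rw [(ih c).1]
        have h1 : pvNoTri (p :: p :: c :: r) = pvNoTri (p :: c :: r) := by
          simp [pvNoTri, Ne.symm hc]
        rw [h1, pvNoTri_cons_ne p c r (Ne.symm hc)]

theorem pvNoT_start (l : List Char) : pvNoT none 0 l = pvNoTri l := by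
  cases l with
  | nil => rfl
  | cons c r =>
    have h0 : (some c == (none : Option Char)) = false := rfl
    show pvNoT none 0 (c :: r) = _
    simp only [pvNoT, h0, Bool.false_eq_true, if_false]
    exact (pvNoT_one_two r c).1

-- B's loop = run-length predicate && balance of the tallies
theorem pvBLoop_eq (l : List Char) : ∀ (w b : Int) (prev : Option Char) (run : Nat),
    pvBLoop l w b prev run =
      (pvNoT prev run l && (w + (l.count 'W' : Int) == b + (l.count 'B' : Int))) := by
  induction l with
  | nil => intro w b prev run; simp [pvBLoop, pvNoT]
  | cons c rest ih =>
    intro w b prev run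
    have hw : w + ((c :: rest).count 'W' : Int)
        = (if c == 'W' then w + 1 else w) + (rest.count 'W' : Int) := by
      simp only [List.count_cons]
      by_cases h : c = 'W' <;> simp [h] <;> ring
    have hb : b + ((c :: rest).count 'B' : Int)
        = (if c != 'W' && c == 'B' then b + 1 else b) + (rest.count 'B' : Int) := by
      simp only [List.count_cons]
      by_cases h : c = 'B'
      · subst h; simp; ring
      · simp [h]
    rw [hw, hb]
    simp only [pvBLoop, pvNoT]
    by_cases hp : some c = prev
    · subst hp
      simp only [beq_self_eq_true, if_true]
      by_cases h3 : run + 1 = 3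
      · simp [h3]
      · have h2 : run ≠ 2 := by omega
        simp [ih, h2, Bool.and_assoc]
    · have hne : (some c == prev) = false := by simp [hp]
      simp [hne, ih]

-- ===== VERDICT (by name: the statement is the Claim_ definition above) =====
theorem verify_line_spec : Claim_equal_verify_line := by
  intro line _
  unfold Spec_verify_line
  simp only [verify_line, verify_line_alt]
  rw [pvBLoop_eq, pvNoT_start]
  rw [PySem.List.slice_from line.toList (by norm_num : (0 : Int) ≤ 1),
      PySem.List.slice_from line.toList (by norm_num : (0 : Int) ≤ 2)]
  simp only [PySem.Str.count_eq, PySem.Str.len_eq, Int.toNat_one,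
    show ((2 : Int).toNat = 2) from rfl]
  have hW : "W".toList = ['W'] := rfl
  have hB : "B".toList = ['B'] := rfl
  rw [hW, hB, pvCount_singleton, pvCount_singleton, pvZipAll]
  set l := line.toList with hl
  by_cases hcnt : l.count 'W' = l.count 'B'
  · rw [if_neg (by simp [hcnt])]
    have hbal : ((0 : Int) + (l.count 'W' : Int) == 0 + (l.count 'B' : Int)) = true := by
      simp [hcnt]
    by_cases hlen : (l.length : Int) < 3
    · rw [if_pos hlen, pvNoTri_short l (by exact_mod_cast hlen), hbal]; rfl
    · rw [if_neg hlen, hbal, Bool.and_true]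
  · rw [if_pos (by simp [hcnt])]
    have hbal : ((0 : Int) + (l.count 'W' : Int) == 0 + (l.count 'B' : Int)) = false := by
      simp [hcnt]
    rw [hbal, Bool.and_false]
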